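-- pv_equiv track=rewrite | github.com/stonkmem/MacGyverSemanticProbing | helper_funcs.py | preprocess_token_sequence
-- ===== SOURCE A (Python) =====
-- def preprocess_token_sequence(tokens, token_sequences):
--     """
--     Remove consecutive duplicate occurrences of any token sequence in the list.
--
--     Args:
--     - tokens: List of tokens (e.g., ["Step", " ", "1", ":", "Step", " ", "1", ":"])
--     - token_sequences: List of token sequences to check for consecutive duplicates (e.g., [["Step", " ", "1", ":"]])
--
--     Returns:
--     - A list of tokens with consecutive duplicates of the sequences removed.
--     """
--     cleaned_tokens = []
--     i = 0
--
--     while i < len(tokens):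
--         found_duplicate = False
--
--         for seq in token_sequences:
--             seq_len = len(seq)
--
--             # Check if current position matches the sequence exactly
--             if tokens[i:i + seq_len] == seq:
--                 # Add the sequence once to the cleaned_tokens
--                 cleaned_tokens.extend(seq)
--
--                 # Skip over consecutive duplicates of the same sequence
--                 while tokens[i:i + seq_len] == seq:
--                     i += seq_len  # Skip the entire sequence, not individual tokens
--
--                 found_duplicate = True
--                 break
--
--         if not found_duplicate:
--             # If no sequence matches, just append the current token
--             cleaned_tokens.append(tokens[i])
--             i += 1
--
--     return cleaned_tokens
-- ===== SOURCE B (Python) =====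
-- def preprocess_token_sequence(tokens, token_sequences):
--     """
--     Remove consecutive duplicate occurrences of any token sequence in the list.
--
--     Staged approach: a right-to-left dynamic-programming pass precomputes, for each
--     sequence and each start position, the number of consecutive copies of that
--     sequence starting there; the emission scan then needs no inner loops or list
--     comparisons at all - one table lookup picks the sequence and one multiplication
--     jumps over its whole run.
--     """
--     n = len(tokens)
--     runs = []  # runs[j][i] = number of consecutive copies of token_sequences[j] at i
--     for seq in token_sequences:
--         step = len(seq)
--         row = [0] * (n + 1)
--         if step:
--             for i in range(n - step, -1, -1):
--                 if tokens[i:i + step] == seq: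
--                     row[i] = row[i + step] + 1
--         runs.append(row)
--
--     cleaned_tokens = []
--     i = 0
--     while i < n:
--         for seq, row in zip(token_sequences, runs):
--             if row[i]:
--                 cleaned_tokens.extend(seq)
--                 i += row[i] * len(seq)
--                 break
--         else:
--             cleaned_tokens.append(tokens[i])
--             i += 1
--     return cleaned_tokens
-- ===== Notes on version B (the rewrite author's own statement) =====
-- stated objective: alternative
-- what changed: Replaced A's nested scan-and-skip loops by a staged algorithm: a right-to-left dynamic-programming pass precomputes a run-length table (consecutive copies of each sequence at each position), after which the emission scan has no inner run loop and no list comparisons - one table lookup and one multiplication jump over each run.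
import Mathlib
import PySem

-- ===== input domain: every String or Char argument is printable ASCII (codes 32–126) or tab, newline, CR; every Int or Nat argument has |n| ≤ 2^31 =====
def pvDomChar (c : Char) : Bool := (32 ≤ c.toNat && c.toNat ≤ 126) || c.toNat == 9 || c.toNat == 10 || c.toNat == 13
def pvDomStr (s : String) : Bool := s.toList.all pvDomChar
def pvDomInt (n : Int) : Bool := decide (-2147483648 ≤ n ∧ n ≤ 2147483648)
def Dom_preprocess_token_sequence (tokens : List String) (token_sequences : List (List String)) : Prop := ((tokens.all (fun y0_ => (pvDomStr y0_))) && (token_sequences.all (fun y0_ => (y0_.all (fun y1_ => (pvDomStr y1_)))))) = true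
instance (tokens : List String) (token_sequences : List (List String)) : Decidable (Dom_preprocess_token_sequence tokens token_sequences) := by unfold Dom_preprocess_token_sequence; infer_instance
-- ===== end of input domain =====

-- B replaces A's nested scan-and-skip loops by a staged algorithm: a backward DP pass
-- precomputes run-length tables, then the scan jumps runs by table lookup; same cost.

-- tokens[i:i+len(seq)] == seq for a Nat index i: Python's slice with nonnegative bounds is
-- exactly drop/take (exact on this domain; both Pythons compute this very expression).
def pvMatchAt (tokens seq : List String) (i : Nat) : Bool :=
  (tokens.drop i).take seq.length == seq

-- ===== PORT A =====
-- inner `while tokens[i:i+seq_len] == seq: i += seq_len` (fueled; fuel tokens.length+1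
-- suffices whenever seq ≠ []; on seq = [] Python A loops forever — excluded by Pre_)
def pvSkip (tokens seq : List String) : Nat → Nat → Nat
  | 0, i => i
  | f+1, i => if pvMatchAt tokens seq i then pvSkip tokens seq f (i + seq.length) else i

-- outer `while i < len(tokens)` with the for/break scan (find? = first matching seq)
def pvALoop (tokens : List String) (seqs : List (List String)) : Nat → Nat → List String → List String
  | 0, _, acc => acc
  | f+1, i, acc =>
    if i < tokens.length then
      match seqs.find? (fun seq => pvMatchAt tokens seq i) with
      | some seq => pvALoop tokens seqs f (pvSkip tokens seq (tokens.length + 1) i) (acc ++ seq)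
      | none => pvALoop tokens seqs f (i + 1) (acc ++ [tokens.getD i ""])
    else acc

def preprocess_token_sequence (tokens : List String) (token_sequences : List (List String)) : List String :=
  pvALoop tokens token_sequences (tokens.length + 1) 0 []

-- ===== PORT B =====
-- B's backward DP pass for one sequence: row[i] = number of consecutive copies of seq
-- starting at i (the Python `for i in range(n - step, -1, -1)` updating a list in place)
def pvRow (tokens seq : List String) : List Nat :=
  let n := tokens.length
  let step := seq.length
  let row := List.replicate (n + 1) 0
  if step ≠ 0 then
    (PySem.List.pyRange ((n : Int) - step) (-1) (-1)).foldl
      (fun row i =>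
        if pvMatchAt tokens seq i.toNat then row.set i.toNat (row.getD (i.toNat + step) 0 + 1)
        else row)
      row
  else row

-- B's emission scan: no inner loop — table lookup plus one multiplicative jump per run
def pvBLoop (tokens : List String) (rows : List (List String × List Nat)) : Nat → Nat → List String → List String
  | 0, _, acc => acc
  | f+1, i, acc =>
    if i < tokens.length then
      match rows.find? (fun p => p.2.getD i 0 != 0) with
      | some p => pvBLoop tokens rows f (i + p.2.getD i 0 * p.1.length) (acc ++ p.1)
      | none => pvBLoop tokens rows f (i + 1) (acc ++ [tokens.getD i ""])
    else acc

def preprocess_token_sequence_alt (tokens : List String) (token_sequences : List (List String)) : List String :=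
  pvBLoop tokens (token_sequences.zip (token_sequences.map (pvRow tokens)))
    (tokens.length + 1) 0 []

-- ===== PRECONDITION & SPEC =====
-- Pre_ excludes only inputs on which Python A never returns: if [] is among the
-- token_sequences and tokens is nonempty, A's inner while advances i by 0 forever.
def Pre_preprocess_token_sequence (tokens : List String) (token_sequences : List (List String)) : Prop :=
  tokens = [] ∨ [] ∉ token_sequences
instance (tokens : List String) (token_sequences : List (List String)) : Decidable (Pre_preprocess_token_sequence tokens token_sequences) := by unfold Pre_preprocess_token_sequence; infer_instance

def pvWitness_preprocess_token_sequence : List String × List (List String) :=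
  (["Step", " ", "1", ":", "Step", " ", "1", ":"], [["Step", " ", "1", ":"]])

def Spec_preprocess_token_sequence (tokens : List String) (token_sequences : List (List String)) (out : List String) : Prop := out = preprocess_token_sequence_alt tokens token_sequences
instance (tokens : List String) (token_sequences : List (List String)) (out : List String) : Decidable (Spec_preprocess_token_sequence tokens token_sequences out) := by unfold Spec_preprocess_token_sequence; infer_instance

-- ===== CLAIM (what is proved, stated in full; the proofs are below) =====
def Claim_equal_preprocess_token_sequence : Prop := ∀ (tokens : List String) (token_sequences : List (List String)), Dom_preprocess_token_sequence tokens token_sequences → Pre_preprocess_token_sequence tokens token_sequences → Spec_preprocess_token_sequence tokens token_sequences (preprocess_token_sequence tokens token_sequences)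

-- ===== LEMMAS AND PROOFS =====

-- run count at i: the value B's DP stores and the number of iterations of A's inner while
def pvRun (tokens seq : List String) : Nat → Nat → Nat
  | 0, _ => 0
  | f+1, i => if pvMatchAt tokens seq i then pvRun tokens seq f (i + seq.length) + 1 else 0

theorem pvMatchAt_bound {tokens seq : List String} {i : Nat}
    (h : pvMatchAt tokens seq i = true) (hne : seq ≠ []) :
    i + seq.length ≤ tokens.length := by
  unfold pvMatchAt at h
  have h' := beq_iff_eq.mp h
  have hlen := congrArg List.length h'
  simp [List.length_take, List.length_drop] at hlen
  have : 0 < seq.length := List.length_pos_iff.mpr hne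
  omega

theorem pvMatchAt_false_of_big {tokens seq : List String} {i : Nat}
    (hne : seq ≠ []) (h : tokens.length < i + seq.length) :
    pvMatchAt tokens seq i = false := by
  by_contra hc
  have := pvMatchAt_bound (by simpa using hc) hne
  omega

-- pvRun ignores the fuel once it exceeds tokens.length - i (each match advances ≥ 1)
theorem pvRun_fuel (tokens seq : List String) (hne : seq ≠ []) :
    ∀ k i f f', tokens.length - i ≤ k → k < f → k < f' →
      pvRun tokens seq f i = pvRun tokens seq f' i := by
  intro k
  induction k with
  | zero =>
    intro i f f' hk hf hf'
    obtain ⟨f, rfl⟩ := Nat.exists_eq_succ_of_ne_zero (by omega : f ≠ 0)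
    obtain ⟨f', rfl⟩ := Nat.exists_eq_succ_of_ne_zero (by omega : f' ≠ 0)
    have hm : pvMatchAt tokens seq i = false := by
      have : 0 < seq.length := List.length_pos_iff.mpr hne
      exact pvMatchAt_false_of_big hne (by omega)
    simp [pvRun, hm]
  | succ k ih =>
    intro i f f' hk hf hf'
    obtain ⟨f, rfl⟩ := Nat.exists_eq_succ_of_ne_zero (by omega : f ≠ 0)
    obtain ⟨f', rfl⟩ := Nat.exists_eq_succ_of_ne_zero (by omega : f' ≠ 0)
    by_cases hm : pvMatchAt tokens seq i
    · have hb := pvMatchAt_bound hm hne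
      have : 0 < seq.length := List.length_pos_iff.mpr hne
      simp only [pvRun, hm, if_true]
      rw [ih (i + seq.length) f f' (by omega) (by omega) (by omega)]
    · simp [pvRun, hm]

-- A's inner while = jump by (run count) × length
theorem pvSkip_eq_run (tokens seq : List String) :
    ∀ f i, pvSkip tokens seq f i = i + pvRun tokens seq f i * seq.length := by
  intro f
  induction f with
  | zero => intro i; simp [pvSkip, pvRun]
  | succ f ih =>
    intro i
    by_cases hm : pvMatchAt tokens seq i
    · simp only [pvSkip, pvRun, hm, if_true, ih]; ring
    · simp [pvSkip, pvRun, hm]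

theorem getD_replicate_zero (n i : Nat) : (List.replicate n (0:Nat)).getD i 0 = 0 := by
  rw [List.getD_eq_getElem?_getD, List.getElem?_replicate]
  split <;> rfl

-- invariant of B's backward DP fold
theorem pvRow_fold (tokens seq : List String) (hne : seq ≠ [])
    (hstep : seq.length ≤ tokens.length) :
    ∀ (m : Nat) (row : List Nat), m + seq.length ≤ tokens.length →
      row.length = tokens.length + 1 →
      (∀ i, i ≤ tokens.length → m < i → row.getD i 0 = pvRun tokens seq (tokens.length + 1) i) →
      (∀ i, i ≤ m → row.getD i 0 = 0) →
      ∀ i, i ≤ tokens.length →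
        ((PySem.List.pyRange (m : Int) (-1) (-1)).foldl
          (fun row j =>
            if pvMatchAt tokens seq j.toNat then
              row.set j.toNat (row.getD (j.toNat + seq.length) 0 + 1)
            else row) row).getD i 0 = pvRun tokens seq (tokens.length + 1) i := by
  intro m
  induction m with
  | zero =>
    intro row hm hlen habove hbelow i hi
    simp only [Nat.cast_zero]
    rw [PySem.List.pyRange_neg_one_cons (by norm_num : (-1:Int) < 0),
      show (0:Int) - 1 = -1 by norm_num,
      PySem.List.pyRange_neg_one_eq_nil (by norm_num : (-1:Int) ≤ -1)]
    simp only [List.foldl_cons, List.foldl_nil, Int.toNat_zero]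
    have hpos : 0 < seq.length := List.length_pos_iff.mpr hne
    by_cases hm0 : pvMatchAt tokens seq 0
    · simp only [hm0, if_true]
      have hget : row.getD (0 + seq.length) 0 = pvRun tokens seq (tokens.length + 1) seq.length := by
        simpa using habove seq.length (by omega) (by omega)
      rcases Nat.eq_zero_or_pos i with hi0 | hip
      · subst hi0
        rw [List.getD_eq_getElem?_getD, List.getElem?_set_self (by omega),
          Option.getD_some, hget]
        have : pvRun tokens seq (tokens.length + 1) 0
            = pvRun tokens seq tokens.length seq.length + 1 := by
          simp [pvRun, hm0]
        rw [this, pvRun_fuel tokens seq hne (tokens.length - seq.length) seq.length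
          tokens.length (tokens.length + 1) (by omega) (by omega) (by omega)]
      · rw [List.getD_eq_getElem?_getD, List.getElem?_set_ne (by omega),
          ← List.getD_eq_getElem?_getD]
        exact habove i hi hip
    · simp only [hm0, Bool.false_eq_true, if_false]
      rcases Nat.eq_zero_or_pos i with hi0 | hip
      · subst hi0
        rw [hbelow 0 (by omega)]
        simp [pvRun, hm0]
      · exact habove i hi hip
  | succ m ih =>
    intro row hm hlen habove hbelow i hi
    rw [PySem.List.pyRange_neg_one_cons (by omega : (-1:Int) < ((m+1 : Nat) : Int)),
      show ((m + 1 : Nat) : Int) - 1 = (m : Int) by push_cast; ring]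
    simp only [List.foldl_cons, Int.toNat_natCast]
    have hpos : 0 < seq.length := List.length_pos_iff.mpr hne
    by_cases hmm : pvMatchAt tokens seq (m + 1)
    · simp only [hmm, if_true]
      apply ih (row.set (m + 1) (row.getD (m + 1 + seq.length) 0 + 1)) (by omega)
        (by simpa using hlen)
      · intro j hj hjm
        rcases Nat.eq_or_lt_of_le (Nat.succ_le_of_lt hjm) with hje | hjl
        · -- j = m + 1 : freshly written value
          rw [← hje, List.getD_eq_getElem?_getD, List.getElem?_set_self (by omega),
            Option.getD_some]
          have hget : row.getD (m + 1 + seq.length) 0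
              = pvRun tokens seq (tokens.length + 1) (m + 1 + seq.length) :=
            habove (m + 1 + seq.length) (by omega) (by omega)
          rw [hget]
          have : pvRun tokens seq (tokens.length + 1) (m + 1)
              = pvRun tokens seq tokens.length (m + 1 + seq.length) + 1 := by
            simp [pvRun, hmm]
          rw [this, pvRun_fuel tokens seq hne (tokens.length - (m + 1 + seq.length))
            (m + 1 + seq.length) tokens.length (tokens.length + 1) (by omega) (by omega)
            (by omega)]
        · rw [List.getD_eq_getElem?_getD, List.getElem?_set_ne (by omega),
            ← List.getD_eq_getElem?_getD]
          exact habove j hj hjl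
      · intro j hj
        rw [List.getD_eq_getElem?_getD, List.getElem?_set_ne (by omega),
          ← List.getD_eq_getElem?_getD]
        exact hbelow j (by omega)
      · exact hi
    · simp only [hmm, Bool.false_eq_true, if_false]
      apply ih row (by omega) hlen
      · intro j hj hjm
        rcases Nat.eq_or_lt_of_le (Nat.succ_le_of_lt hjm) with hje | hjl
        · rw [← hje, hbelow (m + 1) (by omega)]
          simp [pvRun, hmm]
        · exact habove j hj hjl
      · intro j hj; exact hbelow j (by omega)
      · exact hi

-- B's table is exactly the run count, at every position up to tokens.length
theorem pvRow_getD (tokens seq : List String) (hne : seq ≠ []) :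
    ∀ i, i ≤ tokens.length →
      (pvRow tokens seq).getD i 0 = pvRun tokens seq (tokens.length + 1) i := by
  intro i hi
  have hpos : 0 < seq.length := List.length_pos_iff.mpr hne
  unfold pvRow
  simp only [if_pos (by omega : seq.length ≠ 0)]
  by_cases hbig : tokens.length < seq.length
  · have hnil : PySem.List.pyRange ((tokens.length : Int) - seq.length) (-1) (-1) = [] :=
      PySem.List.pyRange_neg_one_eq_nil (by omega)
    rw [hnil, List.foldl_nil, getD_replicate_zero]
    have hm : pvMatchAt tokens seq i = false := pvMatchAt_false_of_big hne (by omega)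
    simp [pvRun, hm]
  · have hcast : ((tokens.length : Int) - seq.length)
        = ((tokens.length - seq.length : Nat) : Int) := by omega
    rw [hcast]
    apply pvRow_fold tokens seq hne (by omega) (tokens.length - seq.length)
      (List.replicate (tokens.length + 1) 0) (by omega) (by simp)
    · intro j hj hjm
      rw [getD_replicate_zero]
      have hm : pvMatchAt tokens seq j = false := pvMatchAt_false_of_big hne (by omega)
      simp [pvRun, hm]
    · intro j _; exact getD_replicate_zero _ _
    · exact hi

-- the table's entry is nonzero exactly where the sequence matches
theorem pvRow_ne_zero (tokens seq : List String) (hne : seq ≠ []) (i : Nat)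
    (hi : i ≤ tokens.length) :
    ((pvRow tokens seq).getD i 0 != 0) = pvMatchAt tokens seq i := by
  rw [pvRow_getD tokens seq hne i hi]
  by_cases hm : pvMatchAt tokens seq i <;> simp [pvRun, hm]

-- the zipped rows list B scans is the map pairing each sequence with its table
theorem pvZip_eq_map (tokens : List String) (seqs : List (List String)) :
    seqs.zip (seqs.map (pvRow tokens)) = seqs.map (fun s => (s, pvRow tokens s)) := by
  induction seqs with
  | nil => rfl
  | cons s rest ih => simp [ih]

-- B's find? over the table rows = A's find? over the sequences, paired with its row
theorem pvFind_eq (tokens : List String) (seqs : List (List String)) (hs : [] ∉ seqs)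
    (i : Nat) (hi : i ≤ tokens.length) :
    (seqs.map (fun s => (s, pvRow tokens s))).find? (fun p => p.2.getD i 0 != 0)
      = (seqs.find? (fun s => pvMatchAt tokens s i)).map (fun s => (s, pvRow tokens s)) := by
  induction seqs with
  | nil => rfl
  | cons s rest ih =>
    have hsne : s ≠ [] := fun h => hs (by simp [h])
    have hpred : ((pvRow tokens s).getD i 0 != 0) = pvMatchAt tokens s i :=
      pvRow_ne_zero tokens s hsne i hi
    by_cases hm : pvMatchAt tokens s i
    · rw [List.map_cons, List.find?_cons_of_pos (by rw [hpred]; exact hm),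
        List.find?_cons_of_pos (p := fun s => pvMatchAt tokens s i) hm, Option.map_some]
    · rw [List.map_cons, List.find?_cons_of_neg (by rw [hpred]; simpa using hm),
        List.find?_cons_of_neg (p := fun s => pvMatchAt tokens s i) (by simpa using hm)]
      exact ih (fun h => hs (by simp [h]))

-- main loop correspondence: same fuel, same index, same accumulator
theorem pvMain (tokens : List String) (seqs : List (List String)) (hs : [] ∉ seqs) :
    ∀ f i acc, i ≤ tokens.length →
      pvALoop tokens seqs f i acc
        = pvBLoop tokens (seqs.zip (seqs.map (pvRow tokens))) f i acc := by
  intro f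
  induction f with
  | zero => intro i acc _; rfl
  | succ f ih =>
    intro i acc hi
    simp only [pvZip_eq_map] at ih ⊢
    by_cases hlt : i < tokens.length
    · simp only [pvALoop, pvBLoop, if_pos hlt,
        pvFind_eq tokens seqs hs i (by omega)]
      cases hf : seqs.find? (fun s => pvMatchAt tokens s i) with
      | none =>
        simp only [Option.map_none]
        exact ih (i + 1) (acc ++ [tokens.getD i ""]) (by omega)
      | some s =>
        simp only [Option.map_some]
        have hsne : s ≠ [] := fun h => hs (h ▸ List.mem_of_find?_eq_some hf)
        have hm : pvMatchAt tokens s i = true := by simpa using List.find?_some hf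
        have hrow : (pvRow tokens s).getD i 0 = pvRun tokens s (tokens.length + 1) i :=
          pvRow_getD tokens s hsne i (by omega)
        have hskip : pvSkip tokens s (tokens.length + 1) i
            = i + (pvRow tokens s).getD i 0 * s.length := by
          rw [hrow, pvSkip_eq_run]
        rw [hskip]
        have hb := pvMatchAt_bound hm hsne
        have hpos : 0 < s.length := List.length_pos_iff.mpr hsne
        apply ih
        -- i + run·len stays ≤ tokens.length: it equals pvSkip, which never overshoots
        have hle : pvSkip tokens s (tokens.length + 1) i ≤ tokens.length := by
          have hend : ∀ g j, j ≤ tokens.length → pvSkip tokens s g j ≤ tokens.length := by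
            intro g
            induction g with
            | zero => intro j hj; simpa [pvSkip] using hj
            | succ g ihg =>
              intro j hj
              by_cases hmj : pvMatchAt tokens s j
              · have := pvMatchAt_bound hmj hsne
                simp only [pvSkip, hmj, if_true]
                exact ihg (j + s.length) (by omega)
              · simpa [pvSkip, hmj] using hj
          exact hend (tokens.length + 1) i (by omega)
        rw [hskip] at hle
        exact hle
    · simp [pvALoop, pvBLoop, hlt]

-- ===== VERDICT (by name: the statement is the Claim_ definition above) =====
theorem preprocess_token_sequence_spec : Claim_equal_preprocess_token_sequence := by
  intro tokens seqs _ hpre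
  unfold Spec_preprocess_token_sequence preprocess_token_sequence preprocess_token_sequence_alt
  rcases hpre with h | h
  · subst h; rfl
  · exact pvMain tokens seqs h (tokens.length + 1) 0 [] (by omega)
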